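-- pv_equiv track=rewrite | github.com/Chenyang-1995/Online-Dynamic-Acknowledgement-with-Learned-Predictions | algorithms.py | TCP_OPT
-- ===== SOURCE A (Python) =====
-- import math
--
-- def TCP_OPT(input_instance, d):
--
--     total_length = len(input_instance)
--
--     opt_value = [math.inf for _ in range(total_length)]
--
--     opt_solution = [ [] for _ in range(total_length) ]
--
--     for index in range(total_length):
--         if index == 0:
--             opt_value[index] = 1
--             opt_solution[index] = [index]
--         else:
--             opt_value[index] = sum([input_instance[i]*d*(index-i)  for i in range(index)]) + 1
--             opt_solution[index] = [index]
--
--             for j in range(index):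
--                 tmp_value = opt_value[j] + sum([input_instance[i]*d*(index-i)  for i in range(j+1,index)]) + 1
--                 if tmp_value < opt_value[index]:
--                     opt_value[index] = tmp_value
--                     opt_solution[index] = opt_solution[j] + [index]
--
--
--     return  opt_value[total_length-1], opt_solution[total_length-1], opt_value
-- ===== SOURCE B (Python) =====
-- def TCP_OPT(input_instance, d):
--     n = len(input_instance)
--     # prefix sums: S[k] = sum of first k packets, W[k] = sum of i*packet_i for i < k,
--     # so every delay-cost segment sum in the DP transition is O(1).
--     S = [sum(input_instance[i] for i in range(k)) for k in range(n + 1)]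
--     W = [sum(i * input_instance[i] for i in range(k)) for k in range(n + 1)]
--
--     def seg(a, idx):
--         # d * sum_{i=a}^{idx-1} input_instance[i] * (idx - i)
--         return d * (idx * (S[idx] - S[a]) - (W[idx] - W[a]))
--
--     values = []
--     sols = []
--     for idx in range(n):
--         best = seg(0, idx) + 1
--         best_sol = [idx]
--         for j in range(idx):
--             tmp = values[j] + seg(j + 1, idx) + 1
--             if tmp < best:
--                 best = tmp
--                 best_sol = sols[j] + [idx]
--         values.append(best)
--         sols.append(best_sol)
--     return values[n - 1], sols[n - 1], values
-- ===== Notes on version B (the rewrite author's own statement) =====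
-- stated objective: faster
-- what changed: B precomputes prefix sums S[k]=sum(x_i) and W[k]=sum(i*x_i) so every DP transition's delay-cost segment sum is O(1) instead of re-summed, turning A's O(n^3) DP into O(n^2); the index-0 special case also disappears.
import Mathlib
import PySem

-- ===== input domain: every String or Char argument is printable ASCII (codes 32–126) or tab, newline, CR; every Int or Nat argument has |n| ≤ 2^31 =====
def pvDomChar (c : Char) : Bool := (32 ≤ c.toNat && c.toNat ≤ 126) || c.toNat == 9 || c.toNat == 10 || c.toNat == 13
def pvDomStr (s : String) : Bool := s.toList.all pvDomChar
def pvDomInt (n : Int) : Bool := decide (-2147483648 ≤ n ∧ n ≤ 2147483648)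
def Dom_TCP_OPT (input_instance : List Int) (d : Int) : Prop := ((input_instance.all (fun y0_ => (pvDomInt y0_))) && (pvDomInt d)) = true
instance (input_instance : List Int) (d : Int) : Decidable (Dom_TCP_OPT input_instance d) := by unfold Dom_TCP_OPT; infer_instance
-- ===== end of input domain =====

-- B replaces A's per-transition segment re-summation by prefix sums (each DP transition O(1)): O(n^3) -> O(n^2).


-- ===== PORT A =====
-- literal port of A: the two index-lists are filled sequentially, so they are built by appending.
def TCP_OPT (input_instance : List Int) (d : Int) : Int × List Int × List Int :=
  let total_length := input_instance.length
  let st := (List.range total_length).foldl (fun (st : List Int × List (List Int)) index =>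
    if index = 0 then
      (st.1 ++ [(1 : Int)], st.2 ++ [[(0 : Int)]])
    else
      let base : Int := ((List.range index).map (fun (i : Nat) =>
        (PySem.List.pyGet? input_instance (i : Int)).getD 0 * d * ((index : Int) - (i : Int)))).sum + 1
      let inner := (List.range index).foldl (fun (acc : Int × List Int) j =>
        let tmp : Int := st.1.getD j 0 + ((List.range' (j+1) (index - (j+1))).map (fun (i : Nat) =>
          (PySem.List.pyGet? input_instance (i : Int)).getD 0 * d * ((index : Int) - (i : Int)))).sum + 1
        if tmp < acc.1 then (tmp, st.2.getD j [] ++ [(index : Int)]) else acc)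
        (base, [(index : Int)])
      (st.1 ++ [inner.1], st.2 ++ [inner.2])) ([], [])
  (PySem.List.pyGetD st.1 ((total_length : Int) - 1) 0,
   PySem.List.pyGetD st.2 ((total_length : Int) - 1) [],
   st.1)

-- ===== PORT B =====
-- B's prefix-sum comprehensions S and W, and its seg helper (the nested 'def seg' of Source B)
def pvS (input_instance : List Int) : List Int :=
  (List.range (input_instance.length + 1)).map (fun k =>
    ((List.range k).map (fun (i : Nat) => (PySem.List.pyGet? input_instance (i : Int)).getD 0)).sum)

def pvW (input_instance : List Int) : List Int :=
  (List.range (input_instance.length + 1)).map (fun k =>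
    ((List.range k).map (fun (i : Nat) => (i : Int) * (PySem.List.pyGet? input_instance (i : Int)).getD 0)).sum)

def pvSeg (input_instance : List Int) (d : Int) (a idx : Nat) : Int :=
  d * ((idx : Int) * ((pvS input_instance).getD idx 0 - (pvS input_instance).getD a 0)
       - ((pvW input_instance).getD idx 0 - (pvW input_instance).getD a 0))

def TCP_OPT_alt (input_instance : List Int) (d : Int) : Int × List Int × List Int :=
  let n := input_instance.length
  let st := (List.range n).foldl (fun (st : List Int × List (List Int)) idx =>
    let inner := (List.range idx).foldl (fun (acc : Int × List Int) j =>
      let tmp : Int := st.1.getD j 0 + pvSeg input_instance d (j+1) idx + 1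
      if tmp < acc.1 then (tmp, st.2.getD j [] ++ [(idx : Int)]) else acc)
      (pvSeg input_instance d 0 idx + 1, [(idx : Int)])
    (st.1 ++ [inner.1], st.2 ++ [inner.2])) ([], [])
  (PySem.List.pyGetD st.1 ((n : Int) - 1) 0,
   PySem.List.pyGetD st.2 ((n : Int) - 1) [],
   st.1)

-- ===== PRECONDITION & SPEC =====
-- Pre_ excludes only the empty list, on which Python A raises IndexError (opt_value[-1] on an empty list; B raises there too).
def Pre_TCP_OPT (input_instance : List Int) (d : Int) : Prop := input_instance ≠ []
instance (input_instance : List Int) (d : Int) : Decidable (Pre_TCP_OPT input_instance d) := by unfold Pre_TCP_OPT; infer_instance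
def pvWitness_TCP_OPT : List Int × Int := ([3, 0, 2], 2)

def Spec_TCP_OPT (input_instance : List Int) (d : Int) (out : Int × List Int × List Int) : Prop := out = TCP_OPT_alt input_instance d
instance (input_instance : List Int) (d : Int) (out : Int × List Int × List Int) : Decidable (Spec_TCP_OPT input_instance d out) := by unfold Spec_TCP_OPT; infer_instance

-- ===== CLAIM (what is proved, stated in full; the proofs are below) =====
def Claim_equal_TCP_OPT : Prop := ∀ (input_instance : List Int) (d : Int), Dom_TCP_OPT input_instance d → Pre_TCP_OPT input_instance d → Spec_TCP_OPT input_instance d (TCP_OPT input_instance d)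

-- ===== LEMMAS AND PROOFS =====

-- value of input_instance[i] as both ports read it
def pvG (xs : List Int) (i : Nat) : Int := (PySem.List.pyGet? xs (i : Int)).getD 0
-- mathematical prefix sums:  pvSf k = Σ_{i<k} x_i,  pvWf k = Σ_{i<k} i·x_i
def pvSf (xs : List Int) (k : Nat) : Int := ((List.range k).map (pvG xs)).sum
def pvWf (xs : List Int) (k : Nat) : Int := ((List.range k).map (fun (i : Nat) => (i : Int) * pvG xs i)).sum

theorem pvSf_succ (xs : List Int) (k : Nat) : pvSf xs (k+1) = pvSf xs k + pvG xs k := by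
  unfold pvSf
  rw [List.range_succ]
  simp

theorem pvWf_succ (xs : List Int) (k : Nat) : pvWf xs (k+1) = pvWf xs k + (k : Int) * pvG xs k := by
  unfold pvWf
  rw [List.range_succ]
  simp

-- the closed form of a delay-cost segment sum (as A computes it, over range(a, a+cnt))
theorem pvSeg_sum (xs : List Int) (d idx : Int) (a cnt : Nat) :
    ((List.range' a cnt).map (fun (i : Nat) =>
      (PySem.List.pyGet? xs (i : Int)).getD 0 * d * (idx - (i : Int)))).sum
      = d * (idx * (pvSf xs (a+cnt) - pvSf xs a) - (pvWf xs (a+cnt) - pvWf xs a)) := by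
  induction cnt with
  | zero => simp
  | succ m ih =>
      rw [List.range'_concat]
      simp only [List.map_append, List.sum_append, List.map_cons, List.map_nil,
        List.sum_cons, List.sum_nil, one_mul, ih]
      have h2 : a + (m+1) = (a+m)+1 := by omega
      rw [h2, pvSf_succ, pvWf_succ]
      have hg : (PySem.List.pyGet? xs ((a+m : Nat) : Int)).getD 0 = pvG xs (a+m) := rfl
      rw [hg]
      push_cast
      ring

-- B's seg helper computes the same closed form
theorem pvSeg_closed (xs : List Int) (d : Int) (a idx : Nat)
    (ha : a ≤ xs.length) (hidx : idx ≤ xs.length) :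
    pvSeg xs d a idx
      = d * ((idx : Int) * (pvSf xs idx - pvSf xs a) - (pvWf xs idx - pvWf xs a)) := by
  unfold pvSeg pvS pvW
  rw [PySem.List.getD_map_range _ _ _ _ (by omega : idx < xs.length + 1),
      PySem.List.getD_map_range _ _ _ _ (by omega : a < xs.length + 1),
      PySem.List.getD_map_range _ _ _ _ (by omega : idx < xs.length + 1),
      PySem.List.getD_map_range _ _ _ _ (by omega : a < xs.length + 1)]
  unfold pvSf pvWf pvG
  rfl

-- the two DP folds coincide
theorem pvFold_eq (xs : List Int) (d : Int) :
    (List.range xs.length).foldl (fun (st : List Int × List (List Int)) index =>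
      if index = 0 then
        (st.1 ++ [(1 : Int)], st.2 ++ [[(0 : Int)]])
      else
        let base : Int := ((List.range index).map (fun (i : Nat) =>
          (PySem.List.pyGet? xs (i : Int)).getD 0 * d * ((index : Int) - (i : Int)))).sum + 1
        let inner := (List.range index).foldl (fun (acc : Int × List Int) j =>
          let tmp : Int := st.1.getD j 0 + ((List.range' (j+1) (index - (j+1))).map (fun (i : Nat) =>
            (PySem.List.pyGet? xs (i : Int)).getD 0 * d * ((index : Int) - (i : Int)))).sum + 1
          if tmp < acc.1 then (tmp, st.2.getD j [] ++ [(index : Int)]) else acc)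
          (base, [(index : Int)])
        (st.1 ++ [inner.1], st.2 ++ [inner.2])) ([], [])
    = (List.range xs.length).foldl (fun (st : List Int × List (List Int)) idx =>
        let inner := (List.range idx).foldl (fun (acc : Int × List Int) j =>
          let tmp : Int := st.1.getD j 0 + pvSeg xs d (j+1) idx + 1
          if tmp < acc.1 then (tmp, st.2.getD j [] ++ [(idx : Int)]) else acc)
          (pvSeg xs d 0 idx + 1, [(idx : Int)])
        (st.1 ++ [inner.1], st.2 ++ [inner.2])) ([], []) := by
  apply PySem.List.foldl_congr_mem
  intro st idx hmem
  have hidx : idx < xs.length := List.mem_range.mp hmem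
  by_cases h0 : idx = 0
  · subst h0
    simp only [List.range_zero, List.foldl_nil]
    rw [pvSeg_closed xs d 0 0 (by omega) (by omega)]
    norm_num [pvSf, pvWf]
  · rw [if_neg h0]
    have hbase0 : ((List.range idx).map (fun (i : Nat) =>
        (PySem.List.pyGet? xs (i : Int)).getD 0 * d * ((idx : Int) - (i : Int)))).sum
        = d * ((idx : Int) * (pvSf xs idx - pvSf xs 0) - (pvWf xs idx - pvWf xs 0)) := by
      rw [List.range_eq_range']
      have h := pvSeg_sum xs d (idx : Int) 0 idx
      rw [show 0 + idx = idx from by omega] at h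
      exact h
    simp only []
    rw [hbase0, pvSeg_closed xs d 0 idx (by omega) (by omega)]
    have hinner : ∀ acc j, j ∈ List.range idx →
        (fun (acc : Int × List Int) j =>
          let tmp : Int := st.1.getD j 0 + ((List.range' (j+1) (idx - (j+1))).map (fun (i : Nat) =>
            (PySem.List.pyGet? xs (i : Int)).getD 0 * d * ((idx : Int) - (i : Int)))).sum + 1
          if tmp < acc.1 then (tmp, st.2.getD j [] ++ [(idx : Int)]) else acc) acc j
        = (fun (acc : Int × List Int) j =>
          let tmp : Int := st.1.getD j 0 + pvSeg xs d (j+1) idx + 1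
          if tmp < acc.1 then (tmp, st.2.getD j [] ++ [(idx : Int)]) else acc) acc j := by
      intro acc j hj
      have hjlt : j < idx := List.mem_range.mp hj
      have hcnt : (j+1) + (idx - (j+1)) = idx := by omega
      have hseg := pvSeg_sum xs d (idx : Int) (j+1) (idx - (j+1))
      rw [hcnt] at hseg
      simp only [hseg, pvSeg_closed xs d (j+1) idx (by omega) (by omega)]
    rw [PySem.List.foldl_congr_mem (List.range idx) _ _ _ hinner]

theorem TCP_OPT_spec : Claim_equal_TCP_OPT := by
  intro xs d _ _
  unfold Spec_TCP_OPT
  simp only [TCP_OPT, TCP_OPT_alt]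
  rw [pvFold_eq xs d]
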